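-- pv_equiv track=rewrite | github.com/spacewalkproject/spacewalk | backend/server/rhnLib.py | transpose_to_hash
-- ===== SOURCE A (Python) =====
-- def transpose_to_hash(arr, column_names):
--     """ Handy function to transpose an array from row-based to column-based,
--         with named columns.
--     """
--     result = []
--     for c in column_names:
--         result.append([])
--
--     colnum = len(column_names)
--     for r in arr:
--         if len(r) != colnum:
--             raise Exception(
--                 "Mismatching number of columns: expected %s, got %s; %s" % (
--                     colnum, len(r), r))
--         for i in range(len(r)):
--             result[i].append(r[i])
--
--     # Now build the hash labeled with the column names
--     rh = {}
--     for i in range(len(column_names)):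
--         rh[column_names[i]] = result[i]
--
--     return rh
-- ===== SOURCE B (Python) =====
-- def transpose_to_hash(arr, column_names):
--     """ Handy function to transpose an array from row-based to column-based,
--         with named columns.
--     """
--     colnum = len(column_names)
--     for r in arr:
--         if len(r) != colnum:
--             raise Exception(
--                 "Mismatching number of columns: expected %s, got %s; %s" % (
--                     colnum, len(r), r))
--     return {name: [r[i] for r in arr]
--             for i, name in enumerate(column_names)}
-- ===== Notes on version B (the rewrite author's own statement) =====
-- stated objective: simpler
-- what changed: Replaces the row-major triple-loop (per-row per-column appends into a pre-built list of lists, then a labelling loop) by a separate validation pass followed by a column-major dict comprehension that builds each named column in one scan of arr.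
import Mathlib
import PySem

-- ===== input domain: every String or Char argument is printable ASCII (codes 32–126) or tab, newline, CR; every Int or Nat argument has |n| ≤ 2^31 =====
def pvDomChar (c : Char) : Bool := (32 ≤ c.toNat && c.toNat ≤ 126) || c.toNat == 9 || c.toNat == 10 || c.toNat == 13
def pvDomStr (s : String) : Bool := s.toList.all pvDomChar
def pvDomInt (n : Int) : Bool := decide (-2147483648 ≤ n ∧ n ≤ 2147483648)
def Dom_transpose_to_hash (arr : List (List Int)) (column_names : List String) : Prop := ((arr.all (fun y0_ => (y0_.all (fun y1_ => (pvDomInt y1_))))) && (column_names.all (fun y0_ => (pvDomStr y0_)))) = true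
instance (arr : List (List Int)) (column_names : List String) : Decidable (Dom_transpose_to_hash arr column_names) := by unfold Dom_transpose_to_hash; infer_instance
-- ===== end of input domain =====

-- B replaces A's row-major append loops by a validation pass plus a column-major dict
-- comprehension (simpler decomposition, same cost); equal on all inputs where A returns.

-- ===== PORT A =====
-- 'result[i].append(r[i])' — one step of A's inner index loop
def pvSetStep (r : List Int) (res : List (List Int)) (i : Nat) : List (List Int) :=
  res.set i (res.getD i [] ++ [r.getD i 0])

-- A's body of 'for r in arr': the mismatch branch is where the Python raises —
-- excluded by Pre_, the port leaves the state unchanged there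
def pvRowStep (colnum : Nat) (res : List (List Int)) (r : List Int) : List (List Int) :=
  if r.length ≠ colnum then res
  else (List.range r.length).foldl (pvSetStep r) res

def transpose_to_hash (arr : List (List Int)) (column_names : List String) :
    List (String × List Int) :=
  let result0 := column_names.foldl (fun res _ => res ++ [([] : List Int)]) []
  let colnum := column_names.length
  let result := arr.foldl (pvRowStep colnum) result0
  let rh := (List.range column_names.length).foldl
    (fun (d : PySem.Dict String (List Int)) i =>
      d.insert (column_names.getD i "") (result.getD i [])) PySem.Dict.empty
  rh.items

-- ===== PORT B =====
-- B's validation pass only raises (excluded by Pre_) or does nothing, then the dict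
-- comprehension '{name: [r[i] for r in arr] for i, name in enumerate(column_names)}'
def transpose_to_hash_alt (arr : List (List Int)) (column_names : List String) :
    List (String × List Int) :=
  ((PySem.List.enumerate column_names 0).foldl
    (fun (d : PySem.Dict String (List Int)) p =>
      d.insert p.2 (arr.map (fun r => PySem.List.pyGetD r p.1 0)))
    PySem.Dict.empty).items

-- ===== PRECONDITION & SPEC =====
-- Pre_ excludes exactly the inputs where the Python A raises its mismatch Exception
-- (some row's length differs from len(column_names)); B raises the same Exception there.
def Pre_transpose_to_hash (arr : List (List Int)) (column_names : List String) : Prop :=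
  ∀ r ∈ arr, r.length = column_names.length
instance (arr : List (List Int)) (column_names : List String) : Decidable (Pre_transpose_to_hash arr column_names) := by unfold Pre_transpose_to_hash; infer_instance

def pvWitness_transpose_to_hash : List (List Int) × List String :=
  ([[1, 2], [3, 4], [5, 6]], ["x", "y"])

def Spec_transpose_to_hash (arr : List (List Int)) (column_names : List String) (out : List (String × List Int)) : Prop := out = transpose_to_hash_alt arr column_names
instance (arr : List (List Int)) (column_names : List String) (out : List (String × List Int)) : Decidable (Spec_transpose_to_hash arr column_names out) := by unfold Spec_transpose_to_hash; infer_instance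

-- ===== CLAIM (what is proved, stated in full; the proofs are below) =====
def Claim_equal_transpose_to_hash : Prop := ∀ (arr : List (List Int)) (column_names : List String), Dom_transpose_to_hash arr column_names → Pre_transpose_to_hash arr column_names → Spec_transpose_to_hash arr column_names (transpose_to_hash arr column_names)

-- ===== LEMMAS AND PROOFS =====

theorem pvSetStep_def (r : List Int) (res : List (List Int)) (i : Nat) :
    pvSetStep r res i = res.set i (res.getD i [] ++ [r.getD i 0]) := rfl

-- the inner set-fold of a row: length is preserved
theorem pvSetFold_length (r : List Int) (m : Nat) (res : List (List Int)) :
    ((List.range m).foldl (pvSetStep r) res).length = res.length := by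
  induction m with
  | zero => simp
  | succ m ih =>
      rw [List.range_succ, List.foldl_append, List.foldl_cons, List.foldl_nil,
        pvSetStep_def, List.length_set]
      exact ih

-- the inner set-fold of a row, pointwise
theorem pvSetFold_getD (r : List Int) (m : Nat) (res : List (List Int))
    (hm : m ≤ res.length) (j : Nat) :
    ((List.range m).foldl (pvSetStep r) res).getD j []
      = if j < m then res.getD j [] ++ [r.getD j 0] else res.getD j [] := by
  induction m generalizing j with
  | zero => simp
  | succ m ih =>
      rw [List.range_succ, List.foldl_append, List.foldl_cons, List.foldl_nil]
      have hm' : m ≤ res.length := by omega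
      have hlen := pvSetFold_length r m res
      have hmid : ((List.range m).foldl (pvSetStep r) res).getD m [] = res.getD m [] := by
        rw [ih hm' m]; simp
      by_cases hj : j = m
      · subst hj
        rw [pvSetStep_def, List.getD, List.getElem?_set_self (by omega), Option.getD_some,
          hmid]
        simp
      · rw [pvSetStep_def, List.getD, List.getElem?_set_ne (by omega), ← List.getD,
          ih hm' j]
        by_cases h2 : j < m
        · simp [h2]; omega
        · simp [h2]; omega

-- the row fold of A builds each column by appending the rows' i-th entries
theorem pvRowsFold_getD (n : Nat) (rows : List (List Int))
    (hrows : ∀ r ∈ rows, r.length = n) (res : List (List Int)) (hlen : res.length = n)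
    (i : Nat) (hi : i < n) :
    (rows.foldl (pvRowStep n) res).getD i []
      = res.getD i [] ++ rows.map (fun r => r.getD i 0) := by
  induction rows generalizing res with
  | nil => simp
  | cons r rows ih =>
      have hr : r.length = n := hrows r (by simp)
      have hstep : pvRowStep n res r = (List.range r.length).foldl (pvSetStep r) res := by
        simp [pvRowStep, hr]
      simp only [List.foldl_cons, List.map_cons]
      rw [ih (fun r h => hrows r (by simp [h])) (pvRowStep n res r)
          (by rw [hstep, pvSetFold_length]; exact hlen)]
      rw [hstep, pvSetFold_getD r r.length res (by omega) i]
      have : i < r.length := by omega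
      simp [this]

-- enumerate as a map over range (with offset), specialised to pair-building
theorem pvEnum_map {α : Type} (F : Int → String → α) (cns : List String) :
    ∀ (s : Nat), (PySem.List.enumerate cns (s : Int)).map (fun p => F p.1 p.2)
      = (List.range cns.length).map (fun i => F ((s + i : Nat) : Int) (cns.getD i "")) := by
  induction cns with
  | nil => intro s; simp [PySem.List.enumerate_nil]
  | cons x xs ih =>
      intro s
      rw [PySem.List.enumerate_cons]
      have h1 : ((s : Int) + 1) = ((s + 1 : Nat) : Int) := by push_cast; ring
      simp only [List.map_cons, List.length_cons, List.range_succ_eq_map, List.map_map, h1,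
        ih (s + 1)]
      refine congrArg₂ _ (by simp) ?_
      apply List.map_congr_left
      intro i _
      simp only [Function.comp]
      have : ((s + 1 + i : Nat) : Int) = ((s + (i + 1) : Nat) : Int) := by push_cast; ring
      rw [this]
      rfl

-- A's initial list of empty columns, pointwise
theorem pvInit_getD (cns : List String) (i : Nat) :
    (cns.map (fun _ => ([] : List Int))).getD i [] = [] := by
  rw [List.getD]
  rcases h : (cns.map (fun _ => ([] : List Int)))[i]? with _ | v
  · rfl
  · have := List.mem_of_getElem? h
    simp at this
    simp [this]

-- ===== VERDICT (by name: the statement is the Claim_ definition above) =====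
theorem transpose_to_hash_spec : Claim_equal_transpose_to_hash := by
  intro arr cns _ hpre
  unfold Spec_transpose_to_hash transpose_to_hash transpose_to_hash_alt
  have hinit : cns.foldl (fun res _ => res ++ [([] : List Int)]) []
      = cns.map (fun _ => ([] : List Int)) := by
    simpa using PySem.List.foldl_append_singleton_eq_map (f := fun _ => ([] : List Int))
      (l := cns) (init := ([] : List (List Int)))
  set n := cns.length with hn
  have hcol : ∀ i < n,
      (arr.foldl (pvRowStep n) (cns.foldl (fun res _ => res ++ [([] : List Int)]) [])).getD i []
        = arr.map (fun r => r.getD i 0) := by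
    intro i hi
    rw [hinit, pvRowsFold_getD n arr hpre _ (by simp [hn]) i hi, pvInit_getD]
    simp
  -- both dict folds are folds of plain inserts over the SAME (key, value) list
  apply congrArg PySem.Dict.items
  set result := arr.foldl (pvRowStep n) (cns.foldl (fun res _ => res ++ [([] : List Int)]) [])
    with hres
  have hA : (List.range n).foldl
      (fun (d : PySem.Dict String (List Int)) i =>
        d.insert (cns.getD i "") (result.getD i [])) PySem.Dict.empty
    = ((List.range n).map (fun i => (cns.getD i "", result.getD i []))).foldl
        (fun d p => d.insert p.1 p.2) PySem.Dict.empty :=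
    (List.foldl_map (f := fun i => (cns.getD i "", result.getD i []))
      (g := fun (d : PySem.Dict String (List Int)) p => d.insert p.1 p.2)
      (l := List.range n) (init := PySem.Dict.empty)).symm
  have hB : (PySem.List.enumerate cns 0).foldl
      (fun (d : PySem.Dict String (List Int)) p =>
        d.insert p.2 (arr.map (fun r => PySem.List.pyGetD r p.1 0))) PySem.Dict.empty
    = ((PySem.List.enumerate cns 0).map
        (fun p => (p.2, arr.map (fun r => PySem.List.pyGetD r p.1 0)))).foldl
        (fun d p => d.insert p.1 p.2) PySem.Dict.empty :=
    (List.foldl_map (f := fun p : Int × String => (p.2, arr.map (fun r => PySem.List.pyGetD r p.1 0)))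
      (g := fun (d : PySem.Dict String (List Int)) p => d.insert p.1 p.2)
      (l := PySem.List.enumerate cns 0) (init := PySem.Dict.empty)).symm
  rw [hA, hB]
  apply congrArg₂ _ rfl
  have henum := pvEnum_map
    (F := fun (i : Int) (name : String) =>
      (name, arr.map (fun r => PySem.List.pyGetD r i 0))) cns 0
  simp only [Nat.cast_zero, Nat.zero_add] at henum
  rw [henum]
  apply List.map_congr_left
  intro i hi
  have hi' : i < n := by simpa [hn] using List.mem_range.mp hi
  rw [hcol i hi']
  simp [PySem.List.pyGetD_natCast]
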